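-- pv_equiv track=rewrite | github.com/YuvalGerzii/one_colsilidated_app | labor_transofrmation/Labor-market-disruption-inequality/backend/app/models/networking_intelligence.py | _is_adjacent_industry
-- ===== SOURCE A (Python) =====
-- def _is_adjacent_industry(industry1: str, industry2: str) -> bool:
--     """Check if industries are adjacent/related"""
--     adjacent_map = {
--         "tech": ["software", "saas", "cloud", "ai", "cybersecurity"],
--         "finance": ["fintech", "banking", "insurance", "investment"],
--         "healthcare": ["biotech", "pharmaceuticals", "medical devices"],
--         "consulting": ["strategy", "management", "advisory"]
--     }
--
--     for key, values in adjacent_map.items():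
--         if industry1.lower() in values and industry2.lower() in values:
--             return True
--     return False
-- ===== SOURCE B (Python) =====
-- _ADJACENT_MAP = {
--     "tech": ["software", "saas", "cloud", "ai", "cybersecurity"],
--     "finance": ["fintech", "banking", "insurance", "investment"],
--     "healthcare": ["biotech", "pharmaceuticals", "medical devices"],
--     "consulting": ["strategy", "management", "advisory"]
-- }
--
-- # inverted index: member string -> group key, built once
-- _GROUP_OF = {member: group for group, members in _ADJACENT_MAP.items() for member in members}
--
--
-- def _is_adjacent_industry(industry1: str, industry2: str) -> bool:
--     """Check if industries are adjacent/related"""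
--     g1 = _GROUP_OF.get(industry1.lower())
--     g2 = _GROUP_OF.get(industry2.lower())
--     return g1 is not None and g1 == g2
-- ===== Notes on version B (the rewrite author's own statement) =====
-- stated objective: idiomatic
-- what changed: Replaces the per-call scan over all groups with two O(1) lookups in an inverted index (member -> group key) built once from the same map; result is g1 is not None and g1 == g2.
import Mathlib
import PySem

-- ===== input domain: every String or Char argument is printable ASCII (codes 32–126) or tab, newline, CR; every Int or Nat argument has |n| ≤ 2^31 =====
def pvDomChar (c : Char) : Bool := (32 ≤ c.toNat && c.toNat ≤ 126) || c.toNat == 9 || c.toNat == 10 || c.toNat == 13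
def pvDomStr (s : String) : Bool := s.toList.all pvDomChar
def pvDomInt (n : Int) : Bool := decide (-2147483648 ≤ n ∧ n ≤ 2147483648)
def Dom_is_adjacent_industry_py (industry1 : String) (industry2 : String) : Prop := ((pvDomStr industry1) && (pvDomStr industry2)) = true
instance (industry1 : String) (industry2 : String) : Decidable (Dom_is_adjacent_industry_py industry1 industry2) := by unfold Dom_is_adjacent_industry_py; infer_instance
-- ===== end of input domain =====

-- B replaces A's per-call scan over all groups with two lookups in an inverted
-- index (member -> group key) built once from the same map (objective: idiomatic).

-- ===== PORT A =====
def pvAdjacentMap : List (String × List String) :=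
  [("tech", ["software", "saas", "cloud", "ai", "cybersecurity"]),
   ("finance", ["fintech", "banking", "insurance", "investment"]),
   ("healthcare", ["biotech", "pharmaceuticals", "medical devices"]),
   ("consulting", ["strategy", "management", "advisory"])]

-- the for-loop over adjacent_map.items(): return True on the first group containing both
def pvScanGroups (l1 l2 : String) : List (String × List String) → Bool
  | [] => false
  | (_, values) :: rest =>
      if values.contains l1 && values.contains l2 then true else pvScanGroups l1 l2 rest

def is_adjacent_industry_py (industry1 : String) (industry2 : String) : Bool :=
  pvScanGroups (PySem.Str.lower industry1) (PySem.Str.lower industry2) pvAdjacentMap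

-- ===== PORT B =====
-- _GROUP_OF = {member: group for group, members in _ADJACENT_MAP.items() for member in members}
def pvGroupOf : PySem.Dict String String :=
  pvAdjacentMap.foldl
    (fun d kv => kv.2.foldl (fun d' member => PySem.Dict.insert d' member kv.1) d)
    PySem.Dict.empty

-- g1 = _GROUP_OF.get(industry1.lower()); g2 = ...; return g1 is not None and g1 == g2
def is_adjacent_industry_py_alt (industry1 : String) (industry2 : String) : Bool :=
  let g1 := PySem.Dict.get? pvGroupOf (PySem.Str.lower industry1)
  let g2 := PySem.Dict.get? pvGroupOf (PySem.Str.lower industry2)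
  g1.isSome && g1 == g2

-- ===== PRECONDITION & SPEC =====
def Spec_is_adjacent_industry_py (industry1 : String) (industry2 : String) (out : Bool) : Prop := out = is_adjacent_industry_py_alt industry1 industry2
instance (industry1 : String) (industry2 : String) (out : Bool) : Decidable (Spec_is_adjacent_industry_py industry1 industry2 out) := by unfold Spec_is_adjacent_industry_py; infer_instance

-- ===== CLAIM (what is proved, stated in full; the proofs are below) =====
def Claim_equal_is_adjacent_industry_py : Prop := ∀ (industry1 : String) (industry2 : String), Dom_is_adjacent_industry_py industry1 industry2 → Spec_is_adjacent_industry_py industry1 industry2 (is_adjacent_industry_py industry1 industry2)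

-- ===== LEMMAS AND PROOFS =====

-- the 15 member strings, the keys of the inverted index
def pvAllMembers : List String :=
  ["software", "saas", "cloud", "ai", "cybersecurity", "fintech", "banking",
   "insurance", "investment", "biotech", "pharmaceuticals", "medical devices",
   "strategy", "management", "advisory"]

-- the index-building fold evaluated once and for all
lemma pvGroupOf_eq : pvGroupOf = PySem.Dict.mk
    [("software", "tech"), ("saas", "tech"), ("cloud", "tech"), ("ai", "tech"),
     ("cybersecurity", "tech"), ("fintech", "finance"), ("banking", "finance"),
     ("insurance", "finance"), ("investment", "finance"), ("biotech", "healthcare"),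
     ("pharmaceuticals", "healthcare"), ("medical devices", "healthcare"),
     ("strategy", "consulting"), ("management", "consulting"), ("advisory", "consulting")] := by
  decide

lemma pv_get_none (s : String) (h : s ∉ pvAllMembers) : PySem.Dict.get? pvGroupOf s = none := by
  rw [pvGroupOf_eq, PySem.Dict.get?_eq_none_iff_not_mem_keys]
  simpa [pvAllMembers] using h

lemma pv_scan_right_none (a b : String) (h : b ∉ pvAllMembers) :
    pvScanGroups a b pvAdjacentMap = false := by
  have h1 : ¬ b ∈ ["software", "saas", "cloud", "ai", "cybersecurity"] := by
    simp only [pvAllMembers, List.mem_cons, List.not_mem_nil] at h ⊢; tauto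
  have h2 : ¬ b ∈ ["fintech", "banking", "insurance", "investment"] := by
    simp only [pvAllMembers, List.mem_cons, List.not_mem_nil] at h ⊢; tauto
  have h3 : ¬ b ∈ ["biotech", "pharmaceuticals", "medical devices"] := by
    simp only [pvAllMembers, List.mem_cons, List.not_mem_nil] at h ⊢; tauto
  have h4 : ¬ b ∈ ["strategy", "management", "advisory"] := by
    simp only [pvAllMembers, List.mem_cons, List.not_mem_nil] at h ⊢; tauto
  simp [pvScanGroups, pvAdjacentMap, h1, h2, h3, h4]

lemma pv_scan_left_none (a b : String) (h : a ∉ pvAllMembers) :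
    pvScanGroups a b pvAdjacentMap = false := by
  have h1 : ¬ a ∈ ["software", "saas", "cloud", "ai", "cybersecurity"] := by
    simp only [pvAllMembers, List.mem_cons, List.not_mem_nil] at h ⊢; tauto
  have h2 : ¬ a ∈ ["fintech", "banking", "insurance", "investment"] := by
    simp only [pvAllMembers, List.mem_cons, List.not_mem_nil] at h ⊢; tauto
  have h3 : ¬ a ∈ ["biotech", "pharmaceuticals", "medical devices"] := by
    simp only [pvAllMembers, List.mem_cons, List.not_mem_nil] at h ⊢; tauto
  have h4 : ¬ a ∈ ["strategy", "management", "advisory"] := by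
    simp only [pvAllMembers, List.mem_cons, List.not_mem_nil] at h ⊢; tauto
  simp [pvScanGroups, pvAdjacentMap, h1, h2, h3, h4]

-- the core equivalence, on the already-lowered strings
set_option maxHeartbeats 4000000 in
lemma pv_core (a b : String) : pvScanGroups a b pvAdjacentMap =
    ((PySem.Dict.get? pvGroupOf a).isSome &&
      (PySem.Dict.get? pvGroupOf a == PySem.Dict.get? pvGroupOf b)) := by
  by_cases ha : a ∈ pvAllMembers
  · by_cases hb : b ∈ pvAllMembers
    · simp only [pvAllMembers, List.mem_cons, List.not_mem_nil, or_false] at ha hb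
      rcases ha with rfl|rfl|rfl|rfl|rfl|rfl|rfl|rfl|rfl|rfl|rfl|rfl|rfl|rfl|rfl <;>
        rcases hb with rfl|rfl|rfl|rfl|rfl|rfl|rfl|rfl|rfl|rfl|rfl|rfl|rfl|rfl|rfl <;> decide
    · rw [pv_scan_right_none a b hb, pv_get_none b hb]
      cases hga : PySem.Dict.get? pvGroupOf a <;> simp
  · rw [pv_scan_left_none a b ha, pv_get_none a ha]
    simp

-- ===== VERDICT (by name: the statement is the Claim_ definition above) =====
theorem is_adjacent_industry_py_spec : Claim_equal_is_adjacent_industry_py := by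
  intro industry1 industry2 _
  unfold Spec_is_adjacent_industry_py is_adjacent_industry_py is_adjacent_industry_py_alt
  exact pv_core _ _
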